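-- pv_equiv track=rewrite | github.com/Mvgnu/BioLabs | backend/app/services/sample_governance.py | _determine_escalation_severity
-- ===== SOURCE A (Python) =====
-- from typing import Any, Iterable, Sequence
--
-- def _determine_escalation_severity(flags: Sequence[str]) -> str | None:
--     if not flags:
--         return None
--     if any(flag.startswith("capacity.") for flag in flags):
--         return "critical"
--     if any(flag.startswith("compartment.") for flag in flags):
--         return "critical"
--     if any(flag in {"occupancy.stale", "lineage.required"} for flag in flags):
--         return "warning"
--     if any(flag == "lineage.unlinked" for flag in flags):
--         return "info"
--     return "warning"
-- ===== SOURCE B (Python) =====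
-- def _determine_escalation_severity(flags):
--     best = -1
--     for flag in flags:
--         if flag.startswith(("capacity.", "compartment.")):
--             rank = 3
--         elif flag in ("occupancy.stale", "lineage.required"):
--             rank = 2
--         elif flag == "lineage.unlinked":
--             rank = 1
--         else:
--             rank = 0
--         if rank > best:
--             best = rank
--     if best < 0:
--         return None
--     return ("warning", "info", "warning", "critical")[best]
-- ===== Notes on version B (the rewrite author's own statement) =====
-- stated objective: alternative
-- what changed: replaces A's four separate any() scans over the flag list by a single pass that classifies each flag into a priority rank and keeps the maximum, then maps the best rank (with the empty-match default ranked below info) to a severity.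
import Mathlib
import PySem

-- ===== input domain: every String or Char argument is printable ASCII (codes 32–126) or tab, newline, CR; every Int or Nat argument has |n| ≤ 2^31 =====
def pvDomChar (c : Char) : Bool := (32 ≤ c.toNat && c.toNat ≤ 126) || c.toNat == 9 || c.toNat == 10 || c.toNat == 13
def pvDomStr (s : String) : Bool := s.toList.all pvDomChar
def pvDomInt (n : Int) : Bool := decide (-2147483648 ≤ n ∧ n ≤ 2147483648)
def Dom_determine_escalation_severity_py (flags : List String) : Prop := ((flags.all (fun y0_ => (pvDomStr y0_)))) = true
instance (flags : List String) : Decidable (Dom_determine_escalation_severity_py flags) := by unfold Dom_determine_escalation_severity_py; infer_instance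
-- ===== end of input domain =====

-- B replaces A's four separate any() scans by a single pass keeping the best priority rank (alternative decomposition, same cost class).

-- ===== PORT A =====
def determine_escalation_severity_py (flags : List String) : Option String :=
  if flags.isEmpty then none
  else if flags.any (fun flag => PySem.Str.startswith flag "capacity.") then some "critical"
  else if flags.any (fun flag => PySem.Str.startswith flag "compartment.") then some "critical"
  else if flags.any (fun flag => flag == "occupancy.stale" || flag == "lineage.required") then some "warning"
  else if flags.any (fun flag => flag == "lineage.unlinked") then some "info"
  else some "warning"

-- ===== PORT B =====
def pvRankOf (flag : String) : Int :=
  if PySem.Str.startswith flag "capacity." || PySem.Str.startswith flag "compartment." then 3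
  else if flag == "occupancy.stale" || flag == "lineage.required" then 2
  else if flag == "lineage.unlinked" then 1
  else 0

def determine_escalation_severity_py_alt (flags : List String) : Option String :=
  let best := flags.foldl (fun b flag => let r := pvRankOf flag; if r > b then r else b) (-1)
  if best < 0 then none
  -- tuple index ("warning","info","warning","critical")[best]: best ∈ {0,1,2,3} whenever it is taken, so pyGet? is always some
  else (PySem.List.pyGet? ["warning", "info", "warning", "critical"] best).getD ""

-- ===== PRECONDITION & SPEC =====
def Spec_determine_escalation_severity_py (flags : List String) (out : Option String) : Prop := out = determine_escalation_severity_py_alt flags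
instance (flags : List String) (out : Option String) : Decidable (Spec_determine_escalation_severity_py flags out) := by unfold Spec_determine_escalation_severity_py; infer_instance

-- ===== CLAIM (what is proved, stated in full; the proofs are below) =====
def Claim_equal_determine_escalation_severity_py : Prop := ∀ (flags : List String), Dom_determine_escalation_severity_py flags → Spec_determine_escalation_severity_py flags (determine_escalation_severity_py flags)

-- ===== LEMMAS AND PROOFS =====

-- the maximum rank over a list, right-fold form
def pvM (fs : List String) : Int := fs.foldr (fun f a => max (pvRankOf f) a) (-1)

lemma pvFold_eq_max (fs : List String) : ∀ b : Int, -1 ≤ b →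
    fs.foldl (fun b flag => let r := pvRankOf flag; if r > b then r else b) b = max b (pvM fs) := by
  induction fs with
  | nil => intro b hb; simp [pvM]; omega
  | cons f fs ih =>
    intro b hb
    have hr : (0:Int) ≤ pvRankOf f := by unfold pvRankOf; split_ifs <;> omega
    have h1 : (let r := pvRankOf f; if r > b then r else b) = max b (pvRankOf f) := by
      simp only []; split_ifs <;> omega
    simp only [List.foldl_cons, h1]
    rw [ih (max b (pvRankOf f)) (by omega)]
    simp only [pvM, List.foldr_cons]
    omega

lemma pvAnyOr (l : List String) (p q : String → Bool) :
    (l.any fun x => p x || q x) = (l.any p || l.any q) := by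
  induction l with
  | nil => rfl
  | cons x xs ih => simp only [List.any_cons, ih]; cases p x <;> cases q x <;> simp

lemma pvM_char (fs : List String) : pvM fs =
    (if fs.any (fun f => PySem.Str.startswith f "capacity." || PySem.Str.startswith f "compartment.") then 3
     else if fs.any (fun f => f == "occupancy.stale" || f == "lineage.required") then 2
     else if fs.any (fun f => f == "lineage.unlinked") then 1
     else if fs.isEmpty then -1 else 0) := by
  induction fs with
  | nil => simp [pvM]
  | cons f fs ih =>
    rw [show pvM (f :: fs) = max (pvRankOf f) (pvM fs) from rfl, ih]
    simp only [List.any_cons, List.isEmpty_cons]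
    unfold pvRankOf
    by_cases h3 : (PySem.Str.startswith f "capacity." || PySem.Str.startswith f "compartment.") = true <;>
      by_cases h2 : (f == "occupancy.stale" || f == "lineage.required") = true <;>
        by_cases h1 : (f == "lineage.unlinked") = true <;>
          simp [h3, h2, h1] <;> split_ifs <;> simp_all <;> first | omega | aesop

-- ===== VERDICT (by name: the statement is the Claim_ definition above) =====
theorem determine_escalation_severity_py_spec : Claim_equal_determine_escalation_severity_py := by
  intro flags _
  unfold Spec_determine_escalation_severity_py determine_escalation_severity_py determine_escalation_severity_py_alt
  rw [pvFold_eq_max flags (-1) (by omega)]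
  have hM := pvM_char flags
  rw [pvAnyOr] at hM
  by_cases he : flags.isEmpty = true
  · have h0 : flags = [] := List.isEmpty_iff.mp he
    subst h0
    simp [pvM]
  · by_cases hcap : (flags.any fun flag => PySem.Str.startswith flag "capacity.") = true
    · have h3 : pvM flags = 3 := by rw [hM, if_pos (by simp only [Bool.or_eq_true]; exact Or.inl hcap)]
      simp only [if_neg he, if_pos hcap, h3]
      decide
    · by_cases hcom : (flags.any fun flag => PySem.Str.startswith flag "compartment.") = true
      · have h3 : pvM flags = 3 := by rw [hM, if_pos (by simp only [Bool.or_eq_true]; exact Or.inr hcom)]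
        simp only [if_neg he, if_neg hcap, if_pos hcom, h3]
        decide
      · by_cases h2 : (flags.any fun flag => flag == "occupancy.stale" || flag == "lineage.required") = true
        · have hv : pvM flags = 2 := by rw [hM, if_neg (by simp only [Bool.or_eq_true, not_or]; exact ⟨hcap, hcom⟩), if_pos h2]
          simp only [if_neg he, if_neg hcap, if_neg hcom, if_pos h2, hv]
          decide
        · by_cases h1 : (flags.any fun flag => flag == "lineage.unlinked") = true
          · have hv : pvM flags = 1 := by rw [hM, if_neg (by simp only [Bool.or_eq_true, not_or]; exact ⟨hcap, hcom⟩), if_neg h2, if_pos h1]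
            simp only [if_neg he, if_neg hcap, if_neg hcom, if_neg h2, if_pos h1, hv]
            decide
          · have hv : pvM flags = 0 := by rw [hM, if_neg (by simp only [Bool.or_eq_true, not_or]; exact ⟨hcap, hcom⟩), if_neg h2, if_neg h1, if_neg he]
            simp only [if_neg he, if_neg hcap, if_neg hcom, if_neg h2, if_neg h1, hv]
            decide
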